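-- pv_equiv track=rewrite | github.com/m-wkr/CamHack- | renderer/font.py | bold
-- ===== SOURCE A (Python) =====
-- def bold(text: str) -> str:
--     t_bold = ''
--     for ch in text:
--         if ch >= 'A' and ch <= 'Z':
--             ch = chr(ord(ch) - ord('A') + 0x1D5D4)
--
--         elif ch >= 'a' and ch <= 'z':
--             ch = chr(ord(ch) - ord('a') + 0x1D5EE)
--
--         elif ch >= '0' and ch <= '9':
--             ch = chr(ord(ch) - ord('0') + 0x1D7EC)
--
--         t_bold += ch
--     return t_bold
-- ===== SOURCE B (Python) =====
-- _TABLE = {}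
-- for _s, _d, _n in ((65, 0x1D5D4, 26), (97, 0x1D5EE, 26), (48, 0x1D7EC, 10)):
--     for _i in range(_n):
--         _TABLE[_s + _i] = _d + _i
--
--
-- def bold(text: str) -> str:
--     return text.translate(_TABLE)
-- ===== Notes on version B (the rewrite author's own statement) =====
-- stated objective: idiomatic
-- what changed: Replaces the per-character loop with three range comparisons by a translation table built once and a single str.translate pass.
import Mathlib
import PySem

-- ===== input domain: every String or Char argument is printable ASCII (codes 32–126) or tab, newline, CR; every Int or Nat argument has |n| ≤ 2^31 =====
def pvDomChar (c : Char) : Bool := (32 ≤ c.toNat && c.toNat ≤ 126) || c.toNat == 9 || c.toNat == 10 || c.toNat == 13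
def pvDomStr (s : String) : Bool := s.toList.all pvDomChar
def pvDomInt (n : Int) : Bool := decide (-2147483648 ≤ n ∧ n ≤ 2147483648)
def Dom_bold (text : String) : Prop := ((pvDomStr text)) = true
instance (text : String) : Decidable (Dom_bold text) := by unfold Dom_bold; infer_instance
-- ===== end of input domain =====

-- B builds one translation table and maps the string through it, instead of A's per-character range branches; same output, proved below.

-- ===== PORT A =====
def boldStep (t : String) (ch : Char) : String :=
  let ch :=
    if 'A' ≤ ch ∧ ch ≤ 'Z' then Char.ofNat (ch.toNat - 'A'.toNat + 0x1D5D4)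
    else if 'a' ≤ ch ∧ ch ≤ 'z' then Char.ofNat (ch.toNat - 'a'.toNat + 0x1D5EE)
    else if '0' ≤ ch ∧ ch ≤ '9' then Char.ofNat (ch.toNat - '0'.toNat + 0x1D7EC)
    else ch
  t ++ String.ofList [ch]

def bold (text : String) : String :=
  text.toList.foldl boldStep ""

-- ===== PORT B =====
-- the translation table: built once from the three (start, target, length) range descriptors
def boldTable : List (Nat × Nat) :=
  [(65, 0x1D5D4, 26), (97, 0x1D5EE, 26), (48, 0x1D7EC, 10)].foldl
    (fun acc (t : Nat × Nat × Nat) =>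
      (List.range t.2.2).foldl (fun a i => a ++ [(t.1 + i, t.2.1 + i)]) acc) []

def boldTr (c : Char) : Char :=
  match boldTable.lookup c.toNat with
  | some d => Char.ofNat d
  | none => c

def bold_alt (text : String) : String :=
  String.ofList (text.toList.map boldTr)

-- ===== PRECONDITION & SPEC =====
def Spec_bold (text : String) (out : String) : Prop := out = bold_alt text
instance (text : String) (out : String) : Decidable (Spec_bold text out) := by unfold Spec_bold; infer_instance

-- ===== CLAIM (what is proved, stated in full; the proofs are below) =====
def Claim_equal_bold : Prop := ∀ (text : String), Dom_bold text → Spec_bold text (bold text)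

-- ===== LEMMAS AND PROOFS =====

-- the per-character branch of A, as a function
def boldF (ch : Char) : Char :=
  if 'A' ≤ ch ∧ ch ≤ 'Z' then Char.ofNat (ch.toNat - 'A'.toNat + 0x1D5D4)
  else if 'a' ≤ ch ∧ ch ≤ 'z' then Char.ofNat (ch.toNat - 'a'.toNat + 0x1D5EE)
  else if '0' ≤ ch ∧ ch ≤ '9' then Char.ofNat (ch.toNat - '0'.toNat + 0x1D7EC)
  else ch

set_option maxRecDepth 4000 in
theorem boldF_eq_tr_small : ∀ n : Nat, n ≤ 126 → boldF (Char.ofNat n) = boldTr (Char.ofNat n) := by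
  decide

theorem boldF_eq_tr (c : Char) (h : pvDomChar c = true) : boldF c = boldTr c := by
  have hle : c.toNat ≤ 126 := by
    simp [pvDomChar] at h
    omega
  have := boldF_eq_tr_small c.toNat hle
  simpa [Char.ofNat_toNat] using this

theorem fold_eq (l : List Char) (acc : String) (h : l.all pvDomChar = true) :
    l.foldl boldStep acc = acc ++ String.ofList (l.map boldTr) := by
  induction l generalizing acc with
  | nil => apply String.ext; simp
  | cons c l ih =>
    simp only [List.all_cons, Bool.and_eq_true] at h
    have hc : boldStep acc c = acc ++ String.ofList [boldTr c] := by
      rw [boldStep, ← boldF_eq_tr c h.1]; rfl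
    simp only [List.foldl_cons, ih _ h.2, hc, List.map_cons]
    apply String.ext
    simp

-- ===== VERDICT (by name: the statement is the Claim_ definition above) =====
theorem bold_spec : Claim_equal_bold := by
  intro text h
  show bold text = bold_alt text
  rw [bold, bold_alt, fold_eq _ _ h]
  apply String.ext
  simp
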